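-- pv_equiv track=rewrite | github.com/rlojunior/sandbox | Python/Assignents/Assign_3/assignment_3_prog_2.py | replace_letter
-- ===== SOURCE A (Python) =====
-- def replace_letter(phrase,letters_redact):
--
--     #the idea here is to "clean" the input and delete the commas
--     letters_redact_new = letters_redact.replace(",","")
--
--     #these variables and the for loop were created to make the program "non case sensitive"
--     letters_redact_new_lower = letters_redact_new.lower()
--     letters_redact_new_upper = letters_redact_new.upper()
--
--     for letter in phrase:
--             if letter in letters_redact_new_lower:
--                 phrase = phrase.replace(letter,"_")
--
--             if letter in letters_redact_new_upper:
--                 phrase = phrase.replace(letter,"_")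
--     return phrase
-- ===== SOURCE B (Python) =====
-- def replace_letter(phrase, letters_redact):
--     cleaned = letters_redact.replace(",", "")
--     table = str.maketrans(dict.fromkeys(cleaned.lower() + cleaned.upper(), "_"))
--     return phrase.translate(table)
-- ===== Notes on version B (the rewrite author's own statement) =====
-- stated objective: idiomatic
-- what changed: A repeatedly rebinds the phrase with one global str.replace per matching letter of the phrase; B builds a translation table (lower+upper of the cleaned letters, all mapped to '_') once and redacts the whole phrase in a single translate pass.
import Mathlib
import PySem

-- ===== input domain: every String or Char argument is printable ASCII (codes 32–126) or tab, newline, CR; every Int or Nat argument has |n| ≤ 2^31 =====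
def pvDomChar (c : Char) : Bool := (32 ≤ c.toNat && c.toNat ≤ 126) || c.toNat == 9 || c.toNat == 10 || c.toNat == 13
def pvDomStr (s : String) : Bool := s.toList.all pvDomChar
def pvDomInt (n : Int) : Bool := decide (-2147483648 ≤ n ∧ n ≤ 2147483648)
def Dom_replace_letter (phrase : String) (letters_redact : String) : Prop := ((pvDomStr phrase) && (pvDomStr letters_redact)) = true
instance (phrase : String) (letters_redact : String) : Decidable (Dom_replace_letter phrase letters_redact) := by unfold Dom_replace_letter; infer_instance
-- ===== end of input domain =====

-- B replaces A's loop of repeated global str.replace calls by one redaction set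
-- built once from the cleaned letters, applied in a single pass (idiomatic).

-- ===== PORT A =====
-- the body of A's for-loop (two `if letter in …: phrase = phrase.replace(letter, "_")` steps)
def replaceLetterBody (lowerS upperS : String) (ph : String) (letter : Char) : String :=
  let ph := if PySem.Chars.isIn [letter] lowerS.toList then
      PySem.Str.replace ph (String.ofList [letter]) "_" else ph
  if PySem.Chars.isIn [letter] upperS.toList then
      PySem.Str.replace ph (String.ofList [letter]) "_" else ph

-- Python's `for letter in phrase:` iterates over the ORIGINAL phrase even though the
-- loop body rebinds `phrase`; the fold state is the current (rebound) phrase.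
def replace_letter (phrase : String) (letters_redact : String) : String :=
  let letters_redact_new := PySem.Str.replace letters_redact "," ""
  let letters_redact_new_lower := PySem.Str.lower letters_redact_new
  let letters_redact_new_upper := PySem.Str.upper letters_redact_new
  phrase.toList.foldl (replaceLetterBody letters_redact_new_lower letters_redact_new_upper) phrase

-- ===== PORT B =====
def replace_letter_alt (phrase : String) (letters_redact : String) : String :=
  let cleaned := PySem.Str.replace letters_redact "," ""
  let table : PySem.Set Char :=
    PySem.Set.ofList ((PySem.Str.lower cleaned).toList ++ (PySem.Str.upper cleaned).toList)
  String.ofList (phrase.toList.map (fun c => if PySem.Set.contains table c then '_' else c))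

-- ===== PRECONDITION & SPEC =====
def Spec_replace_letter (phrase : String) (letters_redact : String) (out : String) : Prop := out = replace_letter_alt phrase letters_redact
instance (phrase : String) (letters_redact : String) (out : String) : Decidable (Spec_replace_letter phrase letters_redact out) := by unfold Spec_replace_letter; infer_instance

-- ===== CLAIM (what is proved, stated in full; the proofs are below) =====
def Claim_equal_replace_letter : Prop := ∀ (phrase : String) (letters_redact : String), Dom_replace_letter phrase letters_redact → Spec_replace_letter phrase letters_redact (replace_letter phrase letters_redact)

-- ===== LEMMAS AND PROOFS =====

-- the pointwise effect of replacing the single character a by '_'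
def pvGa (a : Char) (x : Char) : Char := if x = a then '_' else x

theorem pv_go_single (a : Char) :
    ∀ (l : List Char) (fuel : Nat) (acc : List Char), l.length ≤ fuel →
      PySem.Chars.replace.go [a] ['_'] fuel l acc = acc.reverse ++ l.map (pvGa a) := by
  intro l
  induction l with
  | nil =>
    intro fuel acc _
    cases fuel with
    | zero =>
      conv_lhs => unfold PySem.Chars.replace.go
      simp
    | succ n =>
      conv_lhs => unfold PySem.Chars.replace.go
      simp
  | cons c t ih =>
    intro fuel acc hle
    cases fuel with
    | zero => simp at hle
    | succ n =>
      conv_lhs => unfold PySem.Chars.replace.go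
      simp only [List.isPrefixOf, Bool.and_true]
      by_cases h : a = c
      · subst h
        rw [if_pos (by simp)]
        rw [show List.drop [a].length (a :: t) = t from by simp]
        rw [ih n _ (by simpa using Nat.le_of_succ_le_succ hle)]
        simp [pvGa]
      · rw [if_neg (by simp [h])]
        rw [ih n _ (by simpa using Nat.le_of_succ_le_succ hle)]
        simp [pvGa, Ne.symm h]

theorem pv_replace_single (s : List Char) (a : Char) :
    PySem.Chars.replace s [a] ['_'] = s.map (pvGa a) := by
  unfold PySem.Chars.replace
  rw [if_neg (by simp)]
  rw [pv_go_single a s s.length [] le_rfl]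
  simp

theorem pv_ga_invol (a x : Char) : pvGa a (pvGa a x) = pvGa a x := by
  by_cases h : x = a <;> simp [pvGa, h]

-- the loop condition for one letter
def pvCond (L U : List Char) (a : Char) : Bool :=
  PySem.Chars.isIn [a] L || PySem.Chars.isIn [a] U

theorem pv_step_eq (lowerS upperS : String) (s : List Char) (a : Char) :
    (replaceLetterBody lowerS upperS (String.ofList s) a).toList =
      (if pvCond lowerS.toList upperS.toList a then s.map (pvGa a) else s) := by
  unfold replaceLetterBody pvCond
  cases hL : PySem.Chars.isIn [a] lowerS.toList <;>
    cases hU : PySem.Chars.isIn [a] upperS.toList <;>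
      simp [PySem.Str.replace, pv_replace_single, List.map_map, Function.comp_def, pv_ga_invol]

theorem pv_singleton_isIn (x : Char) (L : List Char) :
    PySem.Chars.isIn [x] L = L.contains x := by
  cases h : L.contains x
  · rw [PySem.Chars.isIn_eq_false_iff]
    intro hinf
    have hx : x ∈ L := hinf.subset (by simp)
    simp [List.contains_eq_mem] at h
    exact h hx
  · rw [PySem.Chars.isIn_iff_infix]
    have hx : x ∈ L := by simpa [List.contains_eq_mem] using h
    obtain ⟨p, q, rfl⟩ := List.append_of_mem hx
    exact ⟨p, q, by simp⟩

theorem pv_fold_map (lowerS upperS : String) :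
    ∀ (letters : List Char) (s : List Char),
      (letters.foldl (replaceLetterBody lowerS upperS) (String.ofList s)).toList =
        s.map (fun x =>
          if letters.contains x && pvCond lowerS.toList upperS.toList x then '_' else x) := by
  intro letters
  induction letters with
  | nil => intro s; simp
  | cons a rest ih =>
    intro s
    rw [List.foldl_cons]
    have hstep := pv_step_eq lowerS upperS s a
    cases hc : pvCond lowerS.toList upperS.toList a
    · rw [hc, if_neg (by simp)] at hstep
      rw [show replaceLetterBody lowerS upperS (String.ofList s) a = String.ofList s from by
        apply String.toList_injective; simp [hstep]]
      rw [ih s]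
      apply List.map_congr_left
      intro x _
      by_cases hxa : x = a
      · subst hxa; simp [hc]
      · simp [hxa]
    · rw [hc, if_pos rfl] at hstep
      rw [show replaceLetterBody lowerS upperS (String.ofList s) a
            = String.ofList (s.map (pvGa a)) from by
        apply String.toList_injective; simp [hstep]]
      rw [ih (s.map (pvGa a)), List.map_map]
      apply List.map_congr_left
      intro x _
      by_cases hxa : x = a
      · subst hxa
        simp [pvGa, hc]
      · simp [pvGa, hxa]

theorem pv_cond_eq_contains (L U : List Char) (x : Char) :
    pvCond L U x = PySem.Set.contains (PySem.Set.ofList (L ++ U)) x := by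
  rw [Bool.eq_iff_iff]
  simp only [pvCond, Bool.or_eq_true, pv_singleton_isIn]
  rw [show (PySem.Set.contains (PySem.Set.ofList (L ++ U)) x = true) ↔ x ∈ PySem.Set.ofList (L ++ U) from
    PySem.Set.contains_iff _ _]
  simp [PySem.Set.mem_ofList, List.contains_eq_mem]

-- ===== VERDICT (by name: the statement is the Claim_ definition above) =====
theorem replace_letter_spec : Claim_equal_replace_letter := by
  intro phrase letters_redact _
  unfold Spec_replace_letter replace_letter replace_letter_alt
  apply String.toList_injective
  have h := pv_fold_map (PySem.Str.lower (PySem.Str.replace letters_redact "," ""))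
      (PySem.Str.upper (PySem.Str.replace letters_redact "," ""))
      phrase.toList phrase.toList
  rw [String.ofList_toList] at h
  simp only [h, String.toList_ofList]
  apply List.map_congr_left
  intro x hx
  rw [pv_cond_eq_contains]
  simp [List.contains_eq_mem, hx]
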